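-- pv_equiv track=rewrite | github.com/juliomarcopineda/jpl-academic-divisions | clean_authors.py | get_last_name_to_docs
-- ===== SOURCE A (Python) =====
-- def get_last_name_to_docs(entries):
--     last_name_to_ids = {}
--     for entry in entries:
--         full_name = entry["name"]
--         last_name = full_name.split(",")[0]
--
--         author_docs = last_name_to_ids.get(last_name, [])
--         author_docs.append(entry)
--         last_name_to_ids[last_name] = author_docs
--
--     return last_name_to_ids
-- ===== SOURCE B (Python) =====
-- def get_last_name_to_docs(entries):
--     def last_name(entry):
--         return entry["name"].split(",")[0]
--     keys = list(dict.fromkeys(last_name(e) for e in entries))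
--     return {k: [e for e in entries if last_name(e) == k] for k in keys}
-- ===== Notes on version B (the rewrite author's own statement) =====
-- stated objective: alternative
-- what changed: Replaces A's single pass that accumulates per-key lists in a dict with a two-phase decomposition: first collect the distinct last names in first-occurrence order (dict.fromkeys), then build each group by filtering the whole entry list per key.
import Mathlib
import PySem

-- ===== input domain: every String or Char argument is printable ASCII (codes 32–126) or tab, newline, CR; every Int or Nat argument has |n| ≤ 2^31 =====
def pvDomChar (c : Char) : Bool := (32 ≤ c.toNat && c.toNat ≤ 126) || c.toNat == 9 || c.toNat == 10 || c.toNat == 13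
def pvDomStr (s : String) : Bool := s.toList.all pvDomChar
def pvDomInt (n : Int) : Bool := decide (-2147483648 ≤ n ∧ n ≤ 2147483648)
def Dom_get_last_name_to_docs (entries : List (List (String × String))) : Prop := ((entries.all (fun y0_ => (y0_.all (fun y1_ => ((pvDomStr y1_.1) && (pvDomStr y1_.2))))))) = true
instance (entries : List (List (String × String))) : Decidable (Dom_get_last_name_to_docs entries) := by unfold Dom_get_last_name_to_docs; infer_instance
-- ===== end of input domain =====

-- B groups entries by last name via distinct-keys-then-filter instead of A's accumulating dict;
-- same return value (alternative decomposition, no speed claim).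

-- ===== PORT A =====
-- shared subexpression of both Pythons: entry["name"].split(",")[0]
-- (entry["name"] ported as first-match lookup with default "" — exact whenever "name" is
--  present, which Pre_ guarantees; split(",") is never empty, so [0] is headD)
def pvLastName (entry : List (String × String)) : String :=
  (((PySem.Str.split? (((entry.find? (fun p => p.1 == "name")).map (fun p => p.2)).getD "") ",").getD []).headD "")

-- the loop body of A
def pvStepA (d : PySem.Dict String (List (List (String × String)))) (entry : List (String × String)) : PySem.Dict String (List (List (String × String))) :=
  let last := pvLastName entry
  let docs := PySem.Dict.getD d last []
  PySem.Dict.insert d last (docs ++ [entry])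

def get_last_name_to_docs (entries : List (List (String × String))) : List (String × List (List (String × String))) :=
  (entries.foldl pvStepA PySem.Dict.empty).items

-- ===== PORT B =====
def get_last_name_to_docs_alt (entries : List (List (String × String))) : List (String × List (List (String × String))) :=
  (PySem.List.dedup (entries.map pvLastName)).map
    (fun k => (k, entries.filter (fun e => pvLastName e == k)))

-- ===== PRECONDITION & SPEC =====
-- Pre_ excludes exactly the entries without a "name" key, on which Python A raises KeyError.
def Pre_get_last_name_to_docs (entries : List (List (String × String))) : Prop :=
  ∀ e ∈ entries, ((e.find? (fun p => p.1 == "name")).isSome = true)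
instance (entries : List (List (String × String))) : Decidable (Pre_get_last_name_to_docs entries) := by unfold Pre_get_last_name_to_docs; infer_instance

def pvWitness_get_last_name_to_docs : (List (List (String × String))) :=
  ([[("name", "Smith, John")], [("name", "Doe, Ann")], [("name", "Smith, Kay")]])

def Spec_get_last_name_to_docs (entries : List (List (String × String))) (out : List (String × List (List (String × String)))) : Prop := out = get_last_name_to_docs_alt entries
instance (entries : List (List (String × String))) (out : List (String × List (List (String × String)))) : Decidable (Spec_get_last_name_to_docs entries out) := by unfold Spec_get_last_name_to_docs; infer_instance

-- ===== CLAIM (what is proved, stated in full; the proofs are below) =====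
def Claim_equal_get_last_name_to_docs : Prop := ∀ (entries : List (List (String × String))), Dom_get_last_name_to_docs entries → Pre_get_last_name_to_docs entries → Spec_get_last_name_to_docs entries (get_last_name_to_docs entries)

-- ===== LEMMAS AND PROOFS =====

-- first match in a keyed map is the tabulated value
lemma pvFind?_map_pair (K : List String) (g : String → List (List (String × String))) (k : String)
    (hk : k ∈ K) :
    List.find? (fun p => p.1 == k) (K.map (fun k' => (k', g k'))) = some (k, g k) := by
  induction K with
  | nil => cases hk
  | cons k0 K ih =>
    by_cases h : k0 = k
    · subst h; simp
    · have hb : (k0 == k) = false := by simp [h]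
      simp only [List.map_cons, List.find?_cons, hb]
      refine ih ?_
      rcases List.mem_cons.1 hk with h' | h'
      · exact absurd h'.symm h
      · exact h'

lemma pvFind?_map_pair_none (K : List String) (g : String → List (List (String × String))) (k : String)
    (hk : k ∉ K) :
    List.find? (fun p => p.1 == k) (K.map (fun k' => (k', g k'))) = none := by
  rw [List.find?_eq_none]
  intro p hp
  simp only [List.mem_map] at hp
  obtain ⟨k', hk', rfl⟩ := hp
  simp only [beq_iff_eq]
  exact fun h => hk (h ▸ hk')

-- dict lookup on a tabulated items list
lemma pvGetD_mem (K : List String) (g : String → List (List (String × String)))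
    (d : PySem.Dict String (List (List (String × String)))) (k : String)
    (hd : d.items = K.map (fun k' => (k', g k'))) (hk : k ∈ K) :
    PySem.Dict.getD d k [] = g k := by
  simp only [PySem.Dict.getD, PySem.Dict.get?, hd, pvFind?_map_pair K g k hk,
    Option.map_some, Option.getD_some]

lemma pvGetD_not_mem (K : List String) (g : String → List (List (String × String)))
    (d : PySem.Dict String (List (List (String × String)))) (k : String)
    (hd : d.items = K.map (fun k' => (k', g k'))) (hk : k ∉ K) :
    PySem.Dict.getD d k [] = [] := by
  simp only [PySem.Dict.getD, PySem.Dict.get?, hd, pvFind?_map_pair_none K g k hk,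
    Option.map_none, Option.getD_none]

-- dict insert on a tabulated items list: overwrite in place / append
lemma pvInsert_mem (K : List String) (g : String → List (List (String × String)))
    (d : PySem.Dict String (List (List (String × String)))) (k : String)
    (v : List (List (String × String)))
    (hd : d.items = K.map (fun k' => (k', g k'))) (hk : k ∈ K) :
    (PySem.Dict.insert d k v).items
      = K.map (fun k' => (k', if k' = k then v else g k')) := by
  have hc : d.contains k = true := by
    simp only [PySem.Dict.contains, hd, List.any_map]
    exact List.any_eq_true.2 ⟨k, hk, by simp⟩
  simp only [PySem.Dict.insert, hc, if_pos, hd, List.map_map]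
  apply List.map_congr_left
  intro k' _
  by_cases h : k' = k
  · subst h; simp
  · have hb : (k' == k) = false := by simp [h]
    simp [Function.comp, hb, h]

lemma pvInsert_not_mem (K : List String) (g : String → List (List (String × String)))
    (d : PySem.Dict String (List (List (String × String)))) (k : String)
    (v : List (List (String × String)))
    (hd : d.items = K.map (fun k' => (k', g k'))) (hk : k ∉ K) :
    (PySem.Dict.insert d k v).items = K.map (fun k' => (k', g k')) ++ [(k, v)] := by
  have hc : d.contains k = false := by
    simp only [PySem.Dict.contains, hd, List.any_map]
    rw [List.any_eq_false]
    intro k' hk'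
    simp only [Function.comp_apply, beq_iff_eq]
    exact fun h => hk (h ▸ hk')
  simp only [PySem.Dict.insert, hc, Bool.false_eq_true, hd]
  simp

-- the filter over one appended entry
lemma pvFilter_append_singleton (es : List (List (String × String)))
    (e : List (String × String)) (k' : String) :
    (es ++ [e]).filter (fun e' => pvLastName e' == k')
      = es.filter (fun e' => pvLastName e' == k')
        ++ (if pvLastName e = k' then [e] else []) := by
  rw [List.filter_append]
  by_cases h : pvLastName e = k'
  · simp [List.filter, h]
  · have hb : (pvLastName e == k') = false := by simp [h]
    simp [List.filter, hb, h]

-- the loop invariant of A's fold, phrased as B's result over any processed prefix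
lemma pvFold_items (es : List (List (String × String))) :
    (es.foldl pvStepA PySem.Dict.empty).items
    = (PySem.List.dedup (es.map pvLastName)).map
        (fun k => (k, es.filter (fun e => pvLastName e == k))) := by
  induction es using List.reverseRecOn with
  | nil => rfl
  | append_singleton es e ih =>
    rw [List.foldl_append, List.map_append, List.map_cons, List.map_nil, List.foldl_cons,
      List.foldl_nil]
    have hded : PySem.List.dedup (es.map pvLastName ++ [pvLastName e])
        = PySem.Set.add (PySem.List.dedup (es.map pvLastName)) (pvLastName e) := by
      simp only [PySem.List.dedup, PySem.Set.ofList_eq_foldl, List.foldl_append, List.foldl_cons,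
        List.foldl_nil]
    rw [hded]
    show (PySem.Dict.insert (es.foldl pvStepA PySem.Dict.empty) (pvLastName e)
        (PySem.Dict.getD (es.foldl pvStepA PySem.Dict.empty) (pvLastName e) [] ++ [e])).items = _
    by_cases hk : pvLastName e ∈ es.map pvLastName
    · have hkK : pvLastName e ∈ PySem.List.dedup (es.map pvLastName) :=
        (PySem.List.mem_dedup _ _).2 hk
      rw [pvGetD_mem _ _ _ _ ih hkK, pvInsert_mem _ _ _ _ _ ih hkK]
      have hadd : PySem.Set.add (PySem.List.dedup (es.map pvLastName)) (pvLastName e)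
          = PySem.List.dedup (es.map pvLastName) := by
        simp only [PySem.Set.add, PySem.Set.contains]
        rw [if_pos (by simpa using hkK)]
      rw [hadd]
      apply List.map_congr_left
      intro k' _
      rw [pvFilter_append_singleton]
      by_cases h : k' = pvLastName e
      · subst h; simp
      · have h2 : pvLastName e ≠ k' := fun hh => h hh.symm
        simp [h, h2]
    · have hkK : pvLastName e ∉ PySem.List.dedup (es.map pvLastName) :=
        fun h => hk ((PySem.List.mem_dedup _ _).1 h)
      rw [pvGetD_not_mem _ _ _ _ ih hkK, pvInsert_not_mem _ _ _ _ _ ih hkK]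
      have hadd : PySem.Set.add (PySem.List.dedup (es.map pvLastName)) (pvLastName e)
          = PySem.List.dedup (es.map pvLastName) ++ [pvLastName e] := by
        simp only [PySem.Set.add, PySem.Set.contains]
        rw [if_neg (by simpa using hkK)]
      rw [hadd, List.map_append, List.map_cons, List.map_nil]
      congr 1
      · apply List.map_congr_left
        intro k' hk'
        rw [pvFilter_append_singleton]
        have h : pvLastName e ≠ k' := fun h => hkK (h ▸ hk')
        simp [h]
      · rw [pvFilter_append_singleton]
        have hnil : es.filter (fun e' => pvLastName e' == pvLastName e) = [] := by
          rw [List.filter_eq_nil_iff]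
          intro e' he'
          simp only [beq_iff_eq]
          exact fun h => hk (h ▸ List.mem_map_of_mem he')
        simp [hnil]

-- ===== VERDICT (by name: the statement is the Claim_ definition above) =====
theorem get_last_name_to_docs_spec : Claim_equal_get_last_name_to_docs := by
  intro entries _ _
  unfold Spec_get_last_name_to_docs get_last_name_to_docs get_last_name_to_docs_alt
  exact pvFold_items entries
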